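-- pv_equiv track=rewrite | github.com/Suldangoo/CodingTest | programmers/Level. 2/124 나라의 숫자(wrong).py | solution
-- ===== SOURCE A (Python) =====
-- from itertools import product
--
-- def solution(n):
--     count = 0
--     r = 0
--     while True:
--         r += 1
--         for i in product([1, 2, 4], repeat=r):
--             count += 1
--             if count == n:
--                 answer = ''.join(map(str, i))
--                 return answer
-- ===== SOURCE B (Python) =====
-- def solution(n):
--     # bijective base-3: repeated division, remainders mapped onto "124"
--     s = ''
--     while n > 0:
--         n, r = divmod(n - 1, 3)
--         s = "124"[r] + s
--     return s
-- ===== Notes on version B (the rewrite author's own statement) =====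
-- stated objective: faster
-- what changed: A enumerates every 124-number in order (count up to n, O(n) tuples via itertools.product); B computes the answer directly by bijective base-3 conversion, repeated divmod by 3 mapping remainders onto the digits 1/2/4, O(log n).
import Mathlib
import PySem

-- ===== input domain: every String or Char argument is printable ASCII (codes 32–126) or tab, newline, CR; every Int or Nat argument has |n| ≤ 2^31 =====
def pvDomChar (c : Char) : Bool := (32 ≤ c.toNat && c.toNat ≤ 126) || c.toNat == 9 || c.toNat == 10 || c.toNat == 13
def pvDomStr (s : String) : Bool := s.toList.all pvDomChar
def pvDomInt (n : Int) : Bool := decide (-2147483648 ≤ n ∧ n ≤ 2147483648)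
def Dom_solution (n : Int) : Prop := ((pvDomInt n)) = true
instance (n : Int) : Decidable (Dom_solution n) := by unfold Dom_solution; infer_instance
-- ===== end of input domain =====

-- B replaces A's O(n) enumeration of all 124-numbers by direct bijective base-3 conversion (O(log n)).

-- ===== PORT A =====
-- ''.join(map(str, i))
def pvJoinA (t : List Int) : String := String.ofList (PySem.Chars.join [] (t.map PySem.Int.toChars))

-- itertools.product([1,2,4], repeat=r), in Python's order (first coordinate slowest)
def pvProd : Nat → List (List Int)
  | 0 => [[]]
  | r + 1 => [1, 2, 4].flatMap (fun d => (pvProd r).map (fun t => d :: t))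

-- the inner 'for i in product(...)' loop: walks the tuples incrementing count, returns the answer when count == n
def pvInner : List (List Int) → Int → Int → Option String × Int
  | [], count, _ => (none, count)
  | t :: ts, count, n =>
      if count + 1 = n then (some (pvJoinA t), count + 1) else pvInner ts (count + 1) n

-- the outer 'while True' loop: r += 1, scan the block of tuples of length r.  The fuel argument only
-- guards totality: for n ≤ 0 Python's loop never returns (outside Pre_), and for 1 ≤ n the fuel
-- n.toNat is proved sufficient below, so the port computes exactly what A computes on Pre_.
def pvOuter : Nat → Nat → Int → Int → String
  | 0, _, _, _ => ""
  | fuel + 1, r, count, n =>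
      match pvInner (pvProd (r + 1)) count n with
      | (some s, _) => s
      | (none, c) => pvOuter fuel (r + 1) c n

def solution (n : Int) : String := pvOuter n.toNat 0 0 n

-- ===== PORT B =====
-- the 'while n > 0' loop of Source B on n.toNat: n, r = divmod(n-1, 3); s = "124"[r] + s
def pvAltLoop : Nat → List Char → List Char
  | 0, s => s
  | k + 1, s => pvAltLoop (k / 3) (("124".toList.getD (k % 3) '?') :: s)
  decreasing_by exact Nat.lt_succ_of_le (Nat.div_le_self k 3)

def solution_alt (n : Int) : String := String.ofList (pvAltLoop n.toNat [])

-- ===== PRECONDITION & SPEC =====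
-- Pre_ excludes n ≤ 0, where A's 'while True' loop never returns (count only increases from 1 upward).
def Pre_solution (n : Int) : Prop := 1 ≤ n
instance (n : Int) : Decidable (Pre_solution n) := by unfold Pre_solution; infer_instance
def pvWitness_solution : Int := (5)

def Spec_solution (n : Int) (out : String) : Prop := out = solution_alt n
instance (n : Int) (out : String) : Decidable (Spec_solution n out) := by unfold Spec_solution; infer_instance

-- ===== CLAIM (what is proved, stated in full; the proofs are below) =====
def Claim_equal_solution : Prop := ∀ (n : Int), Dom_solution n → Pre_solution n → Spec_solution n (solution n)

-- ===== LEMMAS AND PROOFS =====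

-- the common mathematical value: the bijective base-3 string of k over digits "124"
def pvBij : Nat → List Char
  | 0 => []
  | k + 1 => pvBij (k / 3) ++ [("124".toList.getD (k % 3) '?')]
  decreasing_by exact Nat.lt_succ_of_le (Nat.div_le_self k 3)

-- sNat r = (3^r - 1)/2 = index of the first tuple of length r in the global enumeration
def pvS (r : Nat) : Nat := (3 ^ r - 1) / 2

theorem pvS_odd (r : Nat) : 2 * pvS r + 1 = 3 ^ r := by
  induction r with
  | zero => rfl
  | succ r ih => simp only [pvS, pow_succ] at *; omega

theorem pvS_succ (r : Nat) : pvS (r + 1) = 3 * pvS r + 1 := by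
  have h1 := pvS_odd r
  have h2 := pvS_odd (r + 1)
  rw [pow_succ] at h2
  omega

theorem pvBijLoop (k : Nat) (s : List Char) : pvAltLoop k s = pvBij k ++ s := by
  induction k using Nat.strong_induction_on generalizing s with
  | _ k ih =>
    match k with
    | 0 => simp [pvAltLoop, pvBij]
    | k + 1 =>
      rw [pvAltLoop, pvBij, ih (k / 3) (Nat.lt_succ_of_le (Nat.div_le_self k 3))]
      simp

theorem pvProd_length (r : Nat) : (pvProd r).length = 3 ^ r := by
  induction r with
  | zero => rfl
  | succ r ih => simp [pvProd, ih, pow_succ]; ring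

-- the same tuple list, decomposed by its LAST coordinate (fastest-varying) instead of its first
theorem pvProd_snoc (r : Nat) :
    pvProd (r + 1) = (pvProd r).flatMap (fun t => [t ++ [1], t ++ [2], t ++ [4]]) := by
  induction r with
  | zero => rfl
  | succ r ih =>
    show [1, 2, 4].flatMap (fun d => (pvProd (r + 1)).map (fun t => d :: t)) = _
    conv_lhs => rw [ih]
    rw [pvProd]
    simp [List.flatMap_def, Function.comp_def]

theorem pvGetD_flatMap3 (l : List (List Int)) (j d : Nat) (hd : d < 3) (hj : j < l.length) :
    (l.flatMap (fun t => [t ++ [1], t ++ [2], t ++ [4]])).getD (3 * j + d) [] =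
      (l.getD j []) ++ [[1, 2, 4].getD d 0] := by
  induction l generalizing j with
  | nil => simp at hj
  | cons t ts ih =>
    cases j with
    | zero =>
      interval_cases d <;> simp [List.flatMap_cons]
    | succ j =>
      have h3 : 3 * (j + 1) + d = 3 * j + d + 1 + 1 + 1 := by omega
      rw [h3]
      simp only [List.flatMap_cons, List.cons_append, List.nil_append, List.getD_cons_succ]
      exact ih j (Nat.lt_of_succ_lt_succ hj)

theorem pvJoinNil (parts : List (List Char)) : PySem.Chars.join [] parts = parts.flatten := by
  induction parts with
  | nil => rfl
  | cons a l ih =>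
    cases l with
    | nil => simp [PySem.Chars.join, List.intercalate]
    | cons b m =>
      rw [PySem.Chars.join_cons_cons, ih]
      simp

theorem pvJoinA_snoc (t : List Int) (x : Int) :
    PySem.Chars.join [] ((t ++ [x]).map PySem.Int.toChars) =
      PySem.Chars.join [] (t.map PySem.Int.toChars) ++ PySem.Int.toChars x := by
  rw [pvJoinNil, pvJoinNil]
  simp

-- the i-th tuple of length r, joined, is the bijective base-3 string of pvS r + i
theorem pvProdJoin (r : Nat) : ∀ i : Nat, i < 3 ^ r →
    PySem.Chars.join [] (((pvProd r).getD i []).map PySem.Int.toChars) = pvBij (pvS r + i) := by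
  induction r with
  | zero =>
    intro i hi
    interval_cases i
    simp [pvProd, pvS, pvBij, PySem.Chars.join, List.intercalate]
  | succ r ih =>
    intro i hi
    rw [pvProd_snoc]
    have hd : i % 3 < 3 := Nat.mod_lt _ (by norm_num)
    have hj : i / 3 < (pvProd r).length := by
      rw [pvProd_length]
      rw [pow_succ] at hi
      omega
    have hi3 : 3 * (i / 3) + i % 3 = i := by omega
    rw [← hi3, pvGetD_flatMap3 _ _ _ hd hj]
    rw [pvJoinA_snoc]
    rw [ih (i / 3) (by rw [← pvProd_length r]; exact hj)]
    have hk : pvS (r + 1) + (3 * (i / 3) + i % 3) = (3 * (pvS r + i / 3) + i % 3) + 1 := by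
      rw [pvS_succ]; ring
    rw [hk, pvBij]
    have hq : (3 * (pvS r + i / 3) + i % 3) / 3 = pvS r + i / 3 := by omega
    have hr : (3 * (pvS r + i / 3) + i % 3) % 3 = i % 3 := by omega
    rw [hq, hr]
    congr 1
    interval_cases h : i % 3 <;> decide

theorem pvInnerFound (l : List (List Int)) : ∀ (c n : Int), c < n → n ≤ c + l.length →
    (pvInner l c n).1 = some (pvJoinA (l.getD (n - c - 1).toNat [])) := by
  induction l with
  | nil => intro c n h1 h2; simp at h1 h2; omega
  | cons t ts ih =>
    intro c n h1 h2
    rw [pvInner]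
    by_cases h : c + 1 = n
    · have : (n - c - 1).toNat = 0 := by omega
      simp [h, this]
    · rw [if_neg h]
      have := ih (c + 1) n (by omega) (by simp at h2 ⊢; omega)
      rw [this]
      have h0 : (n - c - 1).toNat = (n - (c + 1) - 1).toNat + 1 := by omega
      simp [h0]

theorem pvInnerNone (l : List (List Int)) : ∀ (c n : Int), c + l.length < n →
    pvInner l c n = (none, c + (l.length : Int)) := by
  induction l with
  | nil => intro c n h; simp [pvInner]
  | cons t ts ih =>
    intro c n h
    rw [pvInner, if_neg (by simp at h; omega)]
    rw [ih (c + 1) n (by simp at h ⊢; omega)]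
    simp; ring

theorem pvOuterSpec : ∀ (fuel : Nat) (r : Nat) (c n : Int),
    c = (pvS (r + 1) : Int) - 1 → c < n → n - c ≤ 3 * fuel →
    pvOuter fuel r c n = String.ofList (pvBij n.toNat) := by
  intro fuel
  induction fuel with
  | zero => intro r c n _ h1 h2; omega
  | succ fuel ih =>
    intro r c n hc h1 h2
    rw [pvOuter]
    by_cases hin : n ≤ c + ((pvProd (r + 1)).length : Int)
    · have hfound := pvInnerFound (pvProd (r + 1)) c n h1 hin
      rcases hmatch : pvInner (pvProd (r + 1)) c n with ⟨o, c'⟩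
      rw [hmatch] at hfound
      simp only at hfound
      subst hfound
      simp only
      rw [pvJoinA]
      congr 1
      have hi : (n - c - 1).toNat < 3 ^ (r + 1) := by
        rw [pvProd_length] at hin; omega
      rw [pvProdJoin (r + 1) _ hi]
      congr 1
      have hS1 : 1 ≤ pvS (r + 1) := by
        have := pvS_odd (r + 1)
        have : 1 ≤ 3 ^ (r + 1) := Nat.one_le_pow _ _ (by norm_num)
        omega
      omega
    · rw [not_le] at hin
      rw [pvInnerNone (pvProd (r + 1)) c n hin]
      simp only
      have hl : (pvProd (r + 1)).length = 3 ^ (r + 1) := pvProd_length _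
      have h1' := pvS_odd (r + 1)
      have h2' := pvS_succ (r + 1)
      have h3' : 3 ≤ 3 ^ (r + 1) := by
        calc 3 = 3 ^ 1 := rfl
        _ ≤ 3 ^ (r + 1) := Nat.pow_le_pow_right (by norm_num) (by omega)
      rw [hl] at hin ⊢
      apply ih (r + 1)
      · omega
      · omega
      · omega

-- ===== VERDICT (by name: the statement is the Claim_ definition above) =====
theorem solution_spec : Claim_equal_solution := by
  intro n _ hpre
  unfold Spec_solution solution solution_alt
  rw [pvBijLoop, List.append_nil]
  apply pvOuterSpec
  · simp [pvS]
  · exact hpre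
  · omega
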